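-- pv_equiv track=rewrite | github.com/dariviro1/Dynamo-codes | Current_functions.py | split_string_list_by_separator
-- ===== SOURCE A (Python) =====
-- def split_string_list_by_separator(_string_list, _separator):
--     """
--     Takes a single string or a list of strings and splits each string by the given separator.
--
--     Args:
--         _string_list (str or list): String or list of strings like "Type A, Type B" or ["Type A, Type B"]
--         _separator (str): Separator like ","
--
--     Returns:
--         list: Flat list like ['Type A', 'Type B']
--     """
--     # If input is a single string, convert to list
--     if isinstance(_string_list, str):
--         _string_list = [_string_list]
--
--     result = []
--     for item in _string_list:
--         parts = item.split(_separator)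
--         for part in parts:
--             result.append(part.strip())  # trim spaces
--     return result
-- ===== SOURCE B (Python) =====
-- def split_string_list_by_separator(_string_list, _separator):
--     """Single hand-written scan per item: finds each separator occurrence with
--     str.find and strips the slice between occurrences, never calling str.split."""
--     if isinstance(_string_list, str):
--         _string_list = [_string_list]
--     if not _separator:
--         # the scan below cannot advance past an empty separator
--         raise ValueError('empty separator')
--     result = []
--     for item in _string_list:
--         start = 0
--         while True:
--             i = item.find(_separator, start)
--             if i < 0:
--                 result.append(item[start:].strip())
--                 break
--             result.append(item[start:i].strip())
--             start = i + len(_separator)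
--     return result
-- ===== Notes on version B (the rewrite author's own statement) =====
-- stated objective: alternative
-- what changed: B never calls str.split: it scans each item once by hand with str.find, appending the stripped slice between consecutive separator occurrences, instead of A's split-then-strip nested loops.
-- outside the precondition, e.g. on split_string_list_by_separator([], ''): A returns [], B raises ValueError
import Mathlib
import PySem

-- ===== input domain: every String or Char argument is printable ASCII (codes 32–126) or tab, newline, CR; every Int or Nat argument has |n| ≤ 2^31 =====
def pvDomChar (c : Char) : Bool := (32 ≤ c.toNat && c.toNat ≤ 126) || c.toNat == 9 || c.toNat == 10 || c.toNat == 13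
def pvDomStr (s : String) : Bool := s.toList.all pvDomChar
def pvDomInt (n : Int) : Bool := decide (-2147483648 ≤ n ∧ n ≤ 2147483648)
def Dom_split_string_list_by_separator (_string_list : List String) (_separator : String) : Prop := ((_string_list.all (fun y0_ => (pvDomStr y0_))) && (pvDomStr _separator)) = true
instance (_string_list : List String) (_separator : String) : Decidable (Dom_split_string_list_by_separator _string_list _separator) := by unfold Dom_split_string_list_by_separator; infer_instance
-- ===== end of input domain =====

-- ===== PORT A =====
-- B replaces A's per-item str.split with one hand-written find-based scan per item; return values proved equal.
-- item.split(sep) with sep ≠ "" is PySem.Chars.splitOn on the char lists (exact for sep ≠ ""; sep = "" raises ValueError in Python and is excluded by Pre_).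
def split_string_list_by_separator (_string_list : List String) (_separator : String) : List String :=
  _string_list.foldl
    (fun result item =>
      (((PySem.Chars.splitOn item.toList _separator.toList).map String.ofList).foldl
        (fun r part => r ++ [PySem.Str.strip part]) result))
    []

-- ===== PORT B =====
-- the 'while True' find loop of Source B; fuel = item.length + 1 bounds its iterations (start strictly
-- increases each round for sep ≠ []; Source B raises before the loop for sep = "", excluded by Pre_).
-- item.find(sep, start) = PySem.Chars.findFrom (exact); item[start:i] / item[start:] = PySem.List.slice (exact).
def pvScanItem (item sep : List Char) : Nat → Nat → List String → List String
  | 0, _, res => res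
  | fuel+1, start, res =>
    let i := PySem.Chars.findFrom item sep (start : Int)
    if i < 0 then
      res ++ [PySem.Str.strip (String.ofList (PySem.List.slice item (some (start : Int)) none))]
    else
      pvScanItem item sep fuel (i.toNat + sep.length)
        (res ++ [PySem.Str.strip (String.ofList (PySem.List.slice item (some (start : Int)) (some i)))])

def split_string_list_by_separator_alt (_string_list : List String) (_separator : String) : List String :=
  _string_list.foldl
    (fun result item => pvScanItem item.toList _separator.toList (item.toList.length + 1) 0 result)
    []

-- ===== PRECONDITION & SPEC =====
-- Pre_ excludes the empty separator: A raises ValueError (str.split) whenever there is an item to split, and B's scanner guards against it up front and raises ValueError even for the empty list (where A returns []).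
def Pre_split_string_list_by_separator (_string_list : List String) (_separator : String) : Prop :=
  _separator ≠ ""
instance (_string_list : List String) (_separator : String) : Decidable (Pre_split_string_list_by_separator _string_list _separator) := by unfold Pre_split_string_list_by_separator; infer_instance
def pvWitness_split_string_list_by_separator : List String × String := (["Type A, Type B"], ",")

def Spec_split_string_list_by_separator (_string_list : List String) (_separator : String) (out : List String) : Prop := out = split_string_list_by_separator_alt _string_list _separator
instance (_string_list : List String) (_separator : String) (out : List String) : Decidable (Spec_split_string_list_by_separator _string_list _separator out) := by unfold Spec_split_string_list_by_separator; infer_instance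

-- ===== CLAIM (what is proved, stated in full; the proofs are below) =====
def Claim_equal_split_string_list_by_separator : Prop := ∀ (_string_list : List String) (_separator : String), Dom_split_string_list_by_separator _string_list _separator → Pre_split_string_list_by_separator _string_list _separator → Spec_split_string_list_by_separator _string_list _separator (split_string_list_by_separator _string_list _separator)

-- ===== LEMMAS AND PROOFS =====

-- reference splitter: recursion on the FIRST occurrence of sep (fuel-bounded); both ports are reduced to it
def pvRefSplit (sep : List Char) : Nat → List Char → List (List Char)
  | 0, s => [s]
  | fuel+1, s =>
    let k := PySem.Chars.find s sep
    if k < 0 then [s]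
    else s.take k.toNat :: pvRefSplit sep fuel (s.drop (k.toNat + sep.length))

def pvModHead (p : List Char) : List (List Char) → List (List Char)
  | [] => [p]
  | h :: t => (p ++ h) :: t

theorem pvRefSplit_ne_nil (sep : List Char) (fuel : Nat) (s : List Char) :
    pvRefSplit sep fuel s ≠ [] := by
  cases fuel with
  | zero => simp [pvRefSplit]
  | succ f =>
      show (if PySem.Chars.find s sep < 0 then [s]
            else s.take (PySem.Chars.find s sep).toNat ::
              pvRefSplit sep f (s.drop ((PySem.Chars.find s sep).toNat + sep.length))) ≠ []
      split <;> simp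

-- first-occurrence characterisation of Chars.find
theorem pv_find_eq (s sep : List Char) (j : Nat) (hpre : sep <+: s.drop j)
    (hmin : ∀ i, i < j → ¬ sep <+: s.drop i) : PySem.Chars.find s sep = (j : Int) := by
  have hinf : sep <:+: s := (hpre.isInfix).trans (List.drop_suffix j s).isInfix
  have hnn : 0 ≤ PySem.Chars.find s sep := (PySem.Chars.find_nonneg_iff s sep).2 hinf
  obtain ⟨h1, h2⟩ := PySem.Chars.find_spec hnn
  have hk : (PySem.Chars.find s sep).toNat = j := by
    by_contra hne
    rcases Nat.lt_or_ge (PySem.Chars.find s sep).toNat j with h | h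
    · exact hmin _ h h1
    · exact h2 j (lt_of_le_of_ne h (fun h' => hne h'.symm)) hpre
  omega

-- shift of the first occurrence across a cons with no match at 0
theorem pv_find_cons (c : Char) (rest sep : List Char) (hnp : ¬ sep <+: (c :: rest)) :
    PySem.Chars.find (c :: rest) sep =
      (if PySem.Chars.find rest sep = -1 then -1 else PySem.Chars.find rest sep + 1) := by
  by_cases h : PySem.Chars.find rest sep = -1
  · rw [h, if_pos rfl]
    rw [PySem.Chars.find_eq_neg_one_iff] at h ⊢
    intro hinf
    rcases List.infix_cons_iff.1 hinf with hp | hi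
    · exact hnp hp
    · exact h hi
  · rw [if_neg h]
    have hnn : 0 ≤ PySem.Chars.find rest sep := by
      have := PySem.Chars.neg_one_le_find rest sep; omega
    obtain ⟨h1, h2⟩ := PySem.Chars.find_spec hnn
    have := pv_find_eq (c :: rest) sep ((PySem.Chars.find rest sep).toNat + 1)
      (by simpa using h1)
      (by
        intro i hi
        cases i with
        | zero => simpa using hnp
        | succ i' => intro hp; exact h2 i' (by omega) (by simpa using hp))
    rw [this]; omega

-- accumulator shift for splitOn.go
theorem pv_go_acc (sep : List Char) (fuel : Nat) :
    ∀ (l cur : List Char) (acc : List (List Char)),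
    PySem.Chars.splitOn.go sep fuel l cur acc = acc.reverse ++ PySem.Chars.splitOn.go sep fuel l cur [] := by
  induction fuel with
  | zero => intro l cur acc; rw [PySem.Chars.splitOn.go, PySem.Chars.splitOn.go]; simp
  | succ f ih =>
      intro l cur acc
      cases l with
      | nil =>
          rw [PySem.Chars.splitOn.go, PySem.Chars.splitOn.go] <;> simp
      | cons c rest =>
          rw [PySem.Chars.splitOn.go, PySem.Chars.splitOn.go]
          by_cases hp : sep.isPrefixOf (c :: rest)
          · rw [if_pos hp, if_pos hp, ih _ [] (cur.reverse :: acc), ih _ [] ([cur.reverse])]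
            simp
          · rw [if_neg hp, if_neg hp, ih rest (c :: cur) acc]

-- pvRefSplit does not depend on the fuel once the fuel exceeds the length
theorem pv_ref_congr (sep : List Char) (hsep : sep ≠ []) :
    ∀ (f f' : Nat) (s : List Char), s.length < f → s.length < f' →
      pvRefSplit sep f s = pvRefSplit sep f' s := by
  intro f
  induction f with
  | zero => intro f' s h; omega
  | succ g ih =>
      intro f' s h h'
      cases f' with
      | zero => omega
      | succ g' =>
          show (if PySem.Chars.find s sep < 0 then [s] else _) = (if PySem.Chars.find s sep < 0 then [s] else _)
          by_cases hf : PySem.Chars.find s sep < 0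
          · rw [if_pos hf, if_pos hf]
          · rw [if_neg hf, if_neg hf]
            have hnn : 0 ≤ PySem.Chars.find s sep := by omega
            obtain ⟨h1, _⟩ := PySem.Chars.find_spec hnn
            have hlen : sep.length ≤ s.length - (PySem.Chars.find s sep).toNat := by
              have := h1.length_le; simp at this; omega
            have hs : s ≠ [] := by
              intro he; subst he
              rw [(PySem.Chars.find_eq_neg_one_iff _ _).2 (by simpa using hsep)] at hf; omega
            have hlt : (s.drop ((PySem.Chars.find s sep).toNat + sep.length)).length < g := by
              simp
              have : 1 ≤ sep.length := by cases sep <;> simp_all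
              have : 1 ≤ s.length := by cases s <;> simp_all
              omega
            have hlt' : (s.drop ((PySem.Chars.find s sep).toNat + sep.length)).length < g' := by
              simp
              have : 1 ≤ sep.length := by cases sep <;> simp_all
              have : 1 ≤ s.length := by cases s <;> simp_all
              omega
            rw [ih _ _ hlt hlt']

-- splitOn's scanner computes pvRefSplit
theorem pv_go_ref (sep : List Char) (hsep : sep ≠ []) :
    ∀ (fuel : Nat) (s cur : List Char), s.length < fuel →
      PySem.Chars.splitOn.go sep fuel s cur [] = pvModHead cur.reverse (pvRefSplit sep fuel s) := by
  intro fuel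
  induction fuel with
  | zero => intro s cur h; omega
  | succ f ih =>
      intro s cur h
      have hL : 1 ≤ sep.length := by cases sep <;> simp_all
      cases s with
      | nil =>
          rw [PySem.Chars.splitOn.go]
          have hfind : PySem.Chars.find [] sep = -1 :=
            (PySem.Chars.find_eq_neg_one_iff _ _).2 (by simpa using hsep)
          show _ = pvModHead cur.reverse (if PySem.Chars.find ([] : List Char) sep < 0 then [[]] else _)
          rw [if_pos (by omega)]
          simp [pvModHead]
          omega
      | cons c rest =>
          rw [PySem.Chars.splitOn.go]
          by_cases hp : sep.isPrefixOf (c :: rest)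
          · rw [if_pos hp]
            have hpre : sep <+: (c :: rest) := List.isPrefixOf_iff_prefix.1 hp
            have hfind : PySem.Chars.find (c :: rest) sep = (0 : Int) :=
              pv_find_eq _ _ 0 (by simpa using hpre) (by omega)
            have hlen : (List.drop sep.length (c :: rest)).length < f := by
              have := hpre.length_le
              simp_all; omega
            rw [pv_go_acc, ih _ [] hlen]
            show _ = pvModHead cur.reverse (if PySem.Chars.find (c :: rest) sep < 0 then _ else
              (c :: rest).take (PySem.Chars.find (c :: rest) sep).toNat ::
                pvRefSplit sep f ((c :: rest).drop ((PySem.Chars.find (c :: rest) sep).toNat + sep.length)))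
            rw [if_neg (by omega), hfind]
            have hne := pvRefSplit_ne_nil sep f (List.drop sep.length (c :: rest))
            cases href : pvRefSplit sep f (List.drop sep.length (c :: rest)) with
            | nil => exact absurd href hne
            | cons hh tt => simp [pvModHead, href]
          · rw [if_neg hp]
            have hnp : ¬ sep <+: (c :: rest) := fun hc => hp (List.isPrefixOf_iff_prefix.2 hc)
            have hlen : rest.length < f := by simp at h; omega
            rw [ih rest (c :: cur) hlen]
            have hfc := pv_find_cons c rest sep hnp
            show _ = pvModHead cur.reverse (if PySem.Chars.find (c :: rest) sep < 0 then [c :: rest] else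
              (c :: rest).take (PySem.Chars.find (c :: rest) sep).toNat ::
                pvRefSplit sep f ((c :: rest).drop ((PySem.Chars.find (c :: rest) sep).toNat + sep.length)))
            by_cases hr : PySem.Chars.find rest sep = -1
            · rw [hfc, if_pos hr, if_pos (by omega)]
              -- refSplit f rest = [rest] for any f since find rest = -1
              have hrest : pvRefSplit sep f rest = [rest] := by
                cases f with
                | zero => rfl
                | succ g =>
                    show (if PySem.Chars.find rest sep < 0 then [rest] else _) = [rest]
                    rw [if_pos (by omega)]
              rw [hrest]
              simp [pvModHead]
            · have hnn : (0 : Int) ≤ PySem.Chars.find rest sep := by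
                have := PySem.Chars.neg_one_le_find rest sep; omega
              rw [hfc, if_neg hr, if_neg (by omega)]
              -- fuel: f = f'+1 since rest.length < f
              cases f with
              | zero => omega
              | succ g =>
                  have hrest : pvRefSplit sep (g+1) rest =
                      rest.take (PySem.Chars.find rest sep).toNat ::
                        pvRefSplit sep g (rest.drop ((PySem.Chars.find rest sep).toNat + sep.length)) := by
                    show (if PySem.Chars.find rest sep < 0 then [rest] else _) = _
                    rw [if_neg (by omega)]
                  rw [hrest]
                  have htake : List.take (PySem.Chars.find rest sep + 1).toNat (c :: rest)
                      = c :: List.take (PySem.Chars.find rest sep).toNat rest := by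
                    have : (PySem.Chars.find rest sep + 1).toNat = (PySem.Chars.find rest sep).toNat + 1 := by omega
                    rw [this, List.take_succ_cons]
                  have hdrop : List.drop ((PySem.Chars.find rest sep + 1).toNat + sep.length) (c :: rest)
                      = List.drop ((PySem.Chars.find rest sep).toNat + sep.length) rest := by
                    have : (PySem.Chars.find rest sep + 1).toNat + sep.length
                        = ((PySem.Chars.find rest sep).toNat + sep.length) + 1 := by omega
                    rw [this, List.drop_succ_cons]
                  rw [htake, hdrop]
                  -- fuel congruence on the tail
                  have hfind_le := PySem.Chars.find_le_length rest sep
                  have hcong : pvRefSplit sep (g+1) (rest.drop ((PySem.Chars.find rest sep).toNat + sep.length))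
                      = pvRefSplit sep g (rest.drop ((PySem.Chars.find rest sep).toNat + sep.length)) := by
                    apply pv_ref_congr sep hsep
                    · simp; omega
                    · -- need drop length < g : find rest ≥ 0 → rest nonempty, drop shrinks by ≥ 1
                      have hinf : sep <:+: rest := (PySem.Chars.find_nonneg_iff _ _).1 hnn
                      have hrne : rest ≠ [] := by
                        intro he; subst he
                        exact hr ((PySem.Chars.find_eq_neg_one_iff _ _).2 (by simpa using hsep))
                      have : 1 ≤ rest.length := by cases rest <;> simp_all
                      simp; omega
                  rw [hcong]
                  simp [pvModHead]

theorem pv_splitOn_eq_ref (sep : List Char) (hsep : sep ≠ []) (s : List Char) :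
    PySem.Chars.splitOn s sep = pvRefSplit sep (s.length + 1) s := by
  show PySem.Chars.splitOn.go sep (s.length + 1) s [] [] = _
  rw [pv_go_ref sep hsep (s.length + 1) s [] (by omega)]
  have hne := pvRefSplit_ne_nil sep (s.length + 1) s
  cases href : pvRefSplit sep (s.length + 1) s with
  | nil => exact absurd href hne
  | cons hh tt => simp [pvModHead]

-- B's scanner computes the stripped pvRefSplit parts
theorem pv_scan_ref (item sep : List Char) (hsep : sep ≠ []) :
    ∀ (fuel : Nat), ∀ (start : Nat) (res : List String), start ≤ item.length → item.length - start < fuel →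
      pvScanItem item sep fuel start res
        = res ++ (pvRefSplit sep fuel (item.drop start)).map (fun p => PySem.Str.strip (String.ofList p)) := by
  intro fuel
  induction fuel with
  | zero => intro start res h1 h2; omega
  | succ f ih =>
      intro start res h1 h2
      have hL : 1 ≤ sep.length := by cases sep <;> simp_all
      have hff := PySem.Chars.findFrom_natCast item sep start h1
      show (if PySem.Chars.findFrom item sep (start : Int) < 0 then _ else _) = _
      by_cases hcase : PySem.Chars.find (List.drop start item) sep = -1
      · rw [if_pos (by rw [hff, if_pos hcase]; omega)]
        have hslice : PySem.List.slice item (some (start : Int)) none = List.drop start item :=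
          PySem.List.slice_from_natCast item start
        have href : pvRefSplit sep (f+1) (List.drop start item) = [List.drop start item] := by
          show (if PySem.Chars.find (List.drop start item) sep < 0 then [List.drop start item] else _) = _
          rw [if_pos (by omega)]
        rw [hslice, href]
        simp
      · have hnn : (0:Int) ≤ PySem.Chars.find (List.drop start item) sep := by
          have := PySem.Chars.neg_one_le_find (List.drop start item) sep; omega
        have hival : PySem.Chars.findFrom item sep (start : Int)
            = (start : Int) + PySem.Chars.find (List.drop start item) sep := by
          rw [hff, if_neg hcase]
        rw [if_neg (by rw [hival]; omega)]
        -- abbreviations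
        have hjle : (PySem.Chars.find (List.drop start item) sep).toNat + sep.length
            ≤ (List.drop start item).length := by
          obtain ⟨h1', _⟩ := PySem.Chars.find_spec hnn
          have h2' := h1'.length_le
          rw [List.length_drop, List.length_drop] at h2'
          rw [List.length_drop]
          omega
        have hstart' : (PySem.Chars.findFrom item sep (start : Int)).toNat + sep.length
            = start + ((PySem.Chars.find (List.drop start item) sep).toNat + sep.length) := by
          rw [hival]; omega
        have hle2 : start + ((PySem.Chars.find (List.drop start item) sep).toNat + sep.length) ≤ item.length := by
          simp at hjle; omega
        have hdl : (List.drop start item).length = item.length - start := by simp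
        rw [hstart', ih _ _ (by omega) (by omega)]
        -- slice item[start:i] = take j (drop start item)
        have hslice2 : PySem.List.slice item (some (start : Int)) (some (PySem.Chars.findFrom item sep (start : Int)))
            = List.take (PySem.Chars.find (List.drop start item) sep).toNat (List.drop start item) := by
          rw [hival]
          have : (start : Int) + PySem.Chars.find (List.drop start item) sep
              = ((start + (PySem.Chars.find (List.drop start item) sep).toNat : Nat) : Int) := by omega
          rw [this, PySem.List.slice_natCast]
          congr 1
          omega
        rw [hslice2]
        -- refSplit unfolding on the right
        have href : pvRefSplit sep (f+1) (List.drop start item)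
            = List.take (PySem.Chars.find (List.drop start item) sep).toNat (List.drop start item) ::
              pvRefSplit sep f (List.drop ((PySem.Chars.find (List.drop start item) sep).toNat + sep.length)
                (List.drop start item)) := by
          show (if PySem.Chars.find (List.drop start item) sep < 0 then _ else _) = _
          rw [if_neg (by omega)]
        rw [href]
        rw [List.drop_drop]
        simp [Nat.add_comm]

theorem pv_inner_foldl (parts : List String) (r : List String) :
    parts.foldl (fun r part => r ++ [PySem.Str.strip part]) r = r ++ parts.map PySem.Str.strip := by
  induction parts generalizing r with
  | nil => simp
  | cons a t ih => rw [List.foldl_cons, ih]; simp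

theorem pv_foldl_ext {α β : Type} (f g : β → α → β) (h : ∀ r x, f r x = g r x) :
    ∀ (l : List α) (i : β), l.foldl f i = l.foldl g i := by
  intro l
  induction l with
  | nil => intro i; rfl
  | cons a t ih => intro i; rw [List.foldl_cons, List.foldl_cons, h, ih]

-- ===== VERDICT (by name: the statement is the Claim_ definition above) =====
theorem split_string_list_by_separator_spec : Claim_equal_split_string_list_by_separator := by
  intro ls sep _ hpre
  unfold Spec_split_string_list_by_separator
  unfold split_string_list_by_separator split_string_list_by_separator_alt
  have hsep : sep.toList ≠ [] := by
    intro h; apply hpre; cases sep; simp_all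
  apply pv_foldl_ext
  intro r item
  rw [pv_inner_foldl, List.map_map,
      pv_scan_ref item.toList sep.toList hsep (item.toList.length + 1) 0 r (by omega) (by omega),
      List.drop_zero, pv_splitOn_eq_ref sep.toList hsep]
  rfl
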